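-- pv_equiv track=rewrite | github.com/deysantanu84/python-portfolio | problemSolving/greedyAlgorithms/theShipCompany.py | solve
-- ===== SOURCE A (Python) =====
-- def solve(A, B, C):
--     result = []
--     maxVal = 0
--     minVal = 0
--
--     minQueue = sorted(C)
--     maxQueue = sorted(C, reverse=True)
--
--     while A:
--         temp1 = maxQueue.pop(0)
--         maxVal += temp1
--         if temp1 - 1:
--             maxQueue.append(temp1 - 1)
--             maxQueue.sort(reverse=True)
--
--         temp2 = minQueue.pop(0)
--         minVal += temp2
--         if temp2 - 1:
--             minQueue.append(temp2 - 1)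
--             minQueue.sort()
--
--         A -= 1
--
--     result.append(maxVal)
--     result.append(minVal)
--
--     return result
-- ===== SOURCE B (Python) =====
-- def _rounds(rounds, piles, pick):
--     total = 0
--     for _ in range(rounds):
--         m = pick(piles)
--         total += m
--         i = piles.index(m)
--         if m - 1:
--             piles[i] = m - 1
--         else:
--             piles.pop(i)
--     return total
--
--
-- def solve(A, B, C):
--     return [_rounds(A, list(C), max), _rounds(A, list(C), min)]
-- ===== Notes on version B (the rewrite author's own statement) =====
-- stated objective: alternative
-- what changed: A keeps two queues fully sorted by re-sorting after every round; B never sorts: each round it scans the remaining piles for the current max (resp. min) and updates that pile in place, so each round is one linear scan instead of pop+append+full sort. Pre_ excludes only inputs where A does not return: A<0 (infinite loop) and A larger than the total number of available picks (IndexError; B raises ValueError there too).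
import Mathlib
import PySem

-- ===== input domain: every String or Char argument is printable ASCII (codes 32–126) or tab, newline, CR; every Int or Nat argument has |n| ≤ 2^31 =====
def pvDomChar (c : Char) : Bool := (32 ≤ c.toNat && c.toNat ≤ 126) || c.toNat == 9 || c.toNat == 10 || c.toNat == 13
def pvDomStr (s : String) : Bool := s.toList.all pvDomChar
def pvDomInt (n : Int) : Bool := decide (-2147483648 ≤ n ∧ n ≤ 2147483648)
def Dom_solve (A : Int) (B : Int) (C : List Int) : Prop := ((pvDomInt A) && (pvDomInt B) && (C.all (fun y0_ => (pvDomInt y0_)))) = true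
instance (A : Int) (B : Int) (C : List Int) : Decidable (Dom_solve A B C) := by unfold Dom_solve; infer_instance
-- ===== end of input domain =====

-- B replaces A's sort-every-round queues with sortless scan-for-extremum rounds (alternative algorithm, same return value).

-- ===== PORT A =====
-- the 'while A:' loop; fuel = A.toNat (exact for 0 ≤ A; Python diverges for A < 0, excluded by Pre_).
-- 'none' branches of pop? are Python's IndexError on an empty queue, excluded by Pre_.
def solveLoop : Nat → List Int → List Int → Int → Int → Int × Int
  | 0, _, _, mx, mn => (mx, mn)
  | Nat.succ n, maxQ, minQ, mx, mn =>
    match PySem.List.pop? maxQ 0 with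
    | none => (mx, mn)
    | some (t1, maxQ') =>
      let mx' := mx + t1
      let maxQ2 := if t1 - 1 ≠ 0 then PySem.List.sorted (maxQ' ++ [t1 - 1]) (fun x => x) true else maxQ'
      match PySem.List.pop? minQ 0 with
      | none => (mx', mn)
      | some (t2, minQ') =>
        let mn' := mn + t2
        let minQ2 := if t2 - 1 ≠ 0 then PySem.List.sorted (minQ' ++ [t2 - 1]) (fun x => x) false else minQ'
        solveLoop n maxQ2 minQ2 mx' mn'

def solve (A : Int) (B : Int) (C : List Int) : List Int :=
  let minQueue := PySem.List.sorted C (fun x => x) false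
  let maxQueue := PySem.List.sorted C (fun x => x) true
  let r := solveLoop A.toNat maxQueue minQueue 0 0
  [r.1, r.2]

-- ===== PORT B =====
-- one round of B: scan for the extremal pile (max(piles)/min(piles)), add it, decrement it in place
-- (piles[i] = m-1 is List.set: index? returns an in-range index) or remove it when it hits 0.
-- 'none' branches are Python's ValueError on max/min([]) (excluded by Pre_) resp. unreachable (m ∈ piles).
def solveRounds (pick : List Int → Option Int) : Nat → List Int → Int → Int
  | 0, _, total => total
  | Nat.succ n, piles, total =>
    match pick piles with
    | none => total
    | some m =>
      match PySem.List.index? piles m with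
      | none => total
      | some i =>
        if m - 1 ≠ 0 then solveRounds pick n (piles.set i (m - 1)) (total + m)
        else
          match PySem.List.pop? piles (i : Int) with
          | none => total
          | some r => solveRounds pick n r.2 (total + m)

def solve_alt (A : Int) (B : Int) (C : List Int) : List Int :=
  [solveRounds (fun xs => PySem.List.max? xs (fun x => x)) A.toNat C 0,
   solveRounds (fun xs => PySem.List.min? xs (fun x => x)) A.toNat C 0]

-- ===== PRECONDITION & SPEC =====
-- Pre_ excludes exactly the inputs on which the Python A does not return normally: A < 0 (the
-- 'while A' loop never reaches 0) and more rounds than available picks — each pile c ≥ 1 supplies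
-- exactly c picks before it is removed, a pile c ≤ 0 is never removed — on which A's pop(0) raises
-- IndexError on an empty queue (and B's max/min of an empty list raises ValueError).
def Pre_solve (A : Int) (B : Int) (C : List Int) : Prop :=
  0 ≤ A ∧ (A = 0 ∨ (C ≠ [] ∧ ((∀ c ∈ C, 1 ≤ c) → A ≤ C.sum)))
instance (A : Int) (B : Int) (C : List Int) : Decidable (Pre_solve A B C) := by unfold Pre_solve; infer_instance

def pvWitness_solve : Int × Int × List Int := (3, 3, [3, 1, 2])

def Spec_solve (A : Int) (B : Int) (C : List Int) (out : List Int) : Prop := out = solve_alt A B C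
instance (A : Int) (B : Int) (C : List Int) (out : List Int) : Decidable (Spec_solve A B C out) := by unfold Spec_solve; infer_instance

-- ===== CLAIM (what is proved, stated in full; the proofs are below) =====
def Claim_equal_solve : Prop := ∀ (A : Int) (B : Int) (C : List Int), Dom_solve A B C → Pre_solve A B C → Spec_solve A B C (solve A B C)

-- ===== LEMMAS AND PROOFS =====

-- 'this queue supports n more rounds': preserved by every round, implied by Pre_ at the start.
def Enough (n : Nat) (q : List Int) : Prop :=
  n = 0 ∨ (q ≠ [] ∧ ((∀ x ∈ q, 1 ≤ x) → (n : Int) ≤ q.sum))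


lemma enough_perm {q q' : List Int} (h : q.Perm q') (n : Nat) (e : Enough n q) : Enough n q' := by
  rcases e with e | ⟨hne, hs⟩
  · exact Or.inl e
  · refine Or.inr ⟨?_, ?_⟩
    · intro h'
      have hl := h.length_eq
      rw [h'] at hl
      exact hne (List.eq_nil_of_length_eq_zero hl)
    intro hall
    rw [← h.sum_eq]
    exact hs (fun x hx => hall x (h.subset hx))

lemma enough_step (n : Nat) (m : Int) (rest : List Int) (h : Enough (n + 1) (m :: rest)) :
    Enough n (if m - 1 ≠ 0 then (m - 1) :: rest else rest) := by
  rcases h with h | ⟨-, hs⟩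
  · omega
  by_cases hn : n = 0
  · exact Or.inl hn
  right
  by_cases hm : m - 1 ≠ 0
  · simp only [if_pos hm]
    refine ⟨by simp, ?_⟩
    intro hall
    have h1 : (1 : Int) ≤ m - 1 := hall _ (by simp)
    have hs' : ((n : Int) + 1) ≤ m + rest.sum := by
      have := hs (by
        intro x hx
        rcases List.mem_cons.mp hx with rfl | hx
        · omega
        · exact hall _ (List.mem_cons_of_mem _ hx))
      simpa [List.sum_cons] using this
    simp only [List.sum_cons]
    omega
  · have hm1 : m = 1 := by omega
    simp only [if_neg hm]
    subst hm1
    constructor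
    · rintro rfl
      have := hs (by simp)
      simp at this
      omega
    · intro hall
      have hs' : ((n : Int) + 1) ≤ 1 + rest.sum := by
        have := hs (by
          intro x hx
          rcases List.mem_cons.mp hx with rfl | hx
          · omega
          · exact hall _ hx)
        simpa [List.sum_cons] using this
      omega

lemma max?_eq_of_perm (p rest : List Int) (m : Int) (hperm : (m :: rest).Perm p)
    (hub : ∀ x ∈ rest, x ≤ m) : PySem.List.max? p (fun x => x) = some m := by
  have hmem : m ∈ p := hperm.subset (by simp)
  cases hmx : PySem.List.max? p (fun x => x) with
  | none =>
    rw [PySem.List.max?_eq_none_iff] at hmx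
    simp [hmx] at hmem
  | some m' =>
    have h1 : m' ∈ p := PySem.List.max?_mem hmx
    have h2 : m ≤ m' := PySem.List.max?_isMax hmx m hmem
    have h3 : m' ≤ m := by
      rcases List.mem_cons.mp (hperm.symm.subset h1) with rfl | hx
      · exact le_rfl
      · exact hub _ hx
    have : m' = m := le_antisymm h3 h2
    rw [this]

lemma min?_eq_of_perm (p rest : List Int) (m : Int) (hperm : (m :: rest).Perm p)
    (hlb : ∀ x ∈ rest, m ≤ x) : PySem.List.min? p (fun x => x) = some m := by
  have hmem : m ∈ p := hperm.subset (by simp)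
  cases hmx : PySem.List.min? p (fun x => x) with
  | none =>
    rw [PySem.List.min?_eq_none_iff] at hmx
    simp [hmx] at hmem
  | some m' =>
    have h1 : m' ∈ p := PySem.List.min?_mem hmx
    have h2 : m' ≤ m := PySem.List.min?_isMin hmx m hmem
    have h3 : m ≤ m' := by
      rcases List.mem_cons.mp (hperm.symm.subset h1) with rfl | hx
      · exact le_rfl
      · exact hlb _ hx
    have : m' = m := le_antisymm h2 h3
    rw [this]

-- one round of B, abstracted over the pick function: it consumes the picked value m and leaves
-- a list permuted with the 'decrement or drop' update of the abstract multiset.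
lemma stepB (pick : List Int → Option Int) (n : Nat) (p rest : List Int) (m acc : Int)
    (hpick : pick p = some m) (hperm : (m :: rest).Perm p) :
    ∃ p', solveRounds pick (n + 1) p acc = solveRounds pick n p' (acc + m) ∧
      ((if m - 1 ≠ 0 then (m - 1) :: rest else rest)).Perm p' := by
  have hmem : m ∈ p := hperm.subset (by simp)
  obtain ⟨i, hidx⟩ : ∃ i, PySem.List.index? p m = some i := by
    cases h : PySem.List.index? p m with
    | none => rw [PySem.List.index?_eq_none_iff] at h; exact absurd hmem h
    | some i => exact ⟨i, rfl⟩
  obtain ⟨hk, hget, -⟩ := PySem.List.getElem_of_index?_eq_some hidx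
  have hrest : rest.Perm (p.eraseIdx i) := by
    have h1 : p.Perm (p[i] :: p.eraseIdx i) := (List.getElem_cons_eraseIdx_perm hk).symm
    rw [hget] at h1
    exact (hperm.trans h1).cons_inv
  by_cases hm : m - 1 ≠ 0
  · refine ⟨p.set i (m - 1), ?_, ?_⟩
    · simp only [solveRounds, hpick, hidx, if_pos hm]
    · simp only [if_pos hm]
      exact (hrest.cons (m - 1)).trans (List.set_perm_cons_eraseIdx hk (m - 1)).symm
  · refine ⟨p.eraseIdx i, ?_, ?_⟩
    · have hpop : PySem.List.pop? p (i : Int) = some (p[i], p.eraseIdx i) :=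
        PySem.List.pop?_natCast p i hk
      simp only [solveRounds, hpick, hidx, if_neg hm, hpop]
    · simpa only [if_neg hm] using hrest

lemma loop_eq (n : Nat) : ∀ (maxQ minQ p1 p2 : List Int) (mx mn : Int),
    maxQ.Pairwise (fun a b => b ≤ a) → minQ.Pairwise (fun a b => a ≤ b) →
    maxQ.Perm p1 → minQ.Perm p2 → Enough n maxQ → Enough n minQ →
    solveLoop n maxQ minQ mx mn =
      (solveRounds (fun xs => PySem.List.max? xs (fun x => x)) n p1 mx,
       solveRounds (fun xs => PySem.List.min? xs (fun x => x)) n p2 mn) := by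
  induction n with
  | zero => intros; simp [solveLoop, solveRounds]
  | succ n ih =>
    intro maxQ minQ p1 p2 mx mn hpw1 hpw2 hperm1 hperm2 e1 e2
    obtain ⟨m1, r1, rfl⟩ : ∃ m1 r1, maxQ = m1 :: r1 := by
      rcases maxQ with _ | ⟨m1, r1⟩
      · rcases e1 with e1 | ⟨hne, -⟩ <;> simp_all
      · exact ⟨m1, r1, rfl⟩
    obtain ⟨m2, r2, rfl⟩ : ∃ m2 r2, minQ = m2 :: r2 := by
      rcases minQ with _ | ⟨m2, r2⟩
      · rcases e2 with e2 | ⟨hne, -⟩ <;> simp_all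
      · exact ⟨m2, r2, rfl⟩
    have hub : ∀ x ∈ r1, x ≤ m1 := (List.pairwise_cons.mp hpw1).1
    have hlb : ∀ x ∈ r2, m2 ≤ x := (List.pairwise_cons.mp hpw2).1
    obtain ⟨p1', hB1, hp1'⟩ := stepB (fun xs => PySem.List.max? xs (fun x => x)) n p1 r1 m1 mx (max?_eq_of_perm p1 r1 m1 hperm1 hub) hperm1
    obtain ⟨p2', hB2, hp2'⟩ := stepB (fun xs => PySem.List.min? xs (fun x => x)) n p2 r2 m2 mn (min?_eq_of_perm p2 r2 m2 hperm2 hlb) hperm2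
    rw [hB1, hB2]
    -- the A-side round
    have hA : solveLoop (n + 1) (m1 :: r1) (m2 :: r2) mx mn =
        solveLoop n
          (if m1 - 1 ≠ 0 then PySem.List.sorted (r1 ++ [m1 - 1]) (fun x => x) true else r1)
          (if m2 - 1 ≠ 0 then PySem.List.sorted (r2 ++ [m2 - 1]) (fun x => x) false else r2)
          (mx + m1) (mn + m2) := by
      simp only [solveLoop, PySem.List.pop?_zero_cons]
    rw [hA]
    have hmid1 : (if m1 - 1 ≠ 0 then PySem.List.sorted (r1 ++ [m1 - 1]) (fun x => x) true else r1).Perm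
        (if m1 - 1 ≠ 0 then (m1 - 1) :: r1 else r1) := by
      by_cases hm : m1 - 1 ≠ 0
      · simp only [if_pos hm]
        exact (PySem.List.sorted_perm _ _ _).trans (List.perm_append_singleton _ _)
      · simp only [if_neg hm]
        exact List.Perm.refl _
    have hmid2 : (if m2 - 1 ≠ 0 then PySem.List.sorted (r2 ++ [m2 - 1]) (fun x => x) false else r2).Perm
        (if m2 - 1 ≠ 0 then (m2 - 1) :: r2 else r2) := by
      by_cases hm : m2 - 1 ≠ 0
      · simp only [if_pos hm]
        exact (PySem.List.sorted_perm _ _ _).trans (List.perm_append_singleton _ _)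
      · simp only [if_neg hm]
        exact List.Perm.refl _
    refine ih _ _ _ _ _ _ ?_ ?_ (hmid1.trans hp1') (hmid2.trans hp2')
      (enough_perm hmid1.symm n (enough_step n m1 r1 e1))
      (enough_perm hmid2.symm n (enough_step n m2 r2 e2))
    · by_cases hm : m1 - 1 ≠ 0
      · simp only [if_pos hm]
        exact PySem.List.sorted_pairwise_rev _ _
      · simp only [if_neg hm]
        exact (List.pairwise_cons.mp hpw1).2
    · by_cases hm : m2 - 1 ≠ 0
      · simp only [if_pos hm]
        exact PySem.List.sorted_pairwise _ _
      · simp only [if_neg hm]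
        exact (List.pairwise_cons.mp hpw2).2

lemma enough_of_pre (A : Int) (C : List Int) (rev : Bool)
    (hA : 0 ≤ A) (h : A = 0 ∨ (C ≠ [] ∧ ((∀ c ∈ C, 1 ≤ c) → A ≤ C.sum))) :
    Enough A.toNat (PySem.List.sorted C (fun x => x) rev) := by
  rcases h with rfl | ⟨hC, hs⟩
  · exact Or.inl (by simp)
  · right
    refine ⟨by simpa [PySem.List.sorted_eq_nil_iff] using hC, ?_⟩
    intro hall
    have hsum : (PySem.List.sorted C (fun x => x) rev).sum = C.sum :=
      (PySem.List.sorted_perm _ _ _).sum_eq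
    rw [hsum, Int.toNat_of_nonneg hA]
    exact hs (fun c hc => hall c ((PySem.List.mem_sorted _ _ _ _).mpr hc))

-- ===== VERDICT (by name: the statement is the Claim_ definition above) =====
theorem solve_spec : Claim_equal_solve := by
  intro A B C _hdom hpre
  obtain ⟨hA, hrest⟩ := hpre
  unfold Spec_solve solve solve_alt
  dsimp only
  rw [loop_eq A.toNat (PySem.List.sorted C (fun x => x) true) (PySem.List.sorted C (fun x => x) false)
      C C 0 0 (PySem.List.sorted_pairwise_rev _ _) (PySem.List.sorted_pairwise _ _)
      (PySem.List.sorted_perm _ _ _) (PySem.List.sorted_perm _ _ _)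
      (enough_of_pre A C true hA hrest) (enough_of_pre A C false hA hrest)]
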